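-- pv_equiv track=rewrite | github.com/itsmemdtofik/Python | String/Easy/CheckKthAnagramString.py | kth_anagram
-- ===== SOURCE A (Python) =====
-- from collections import defaultdict
--
-- def kth_anagram(s1: str, s2: str, K: int) -> bool:
--     if s1 is None or s2 is None:
--         return False
--
--     if len(s1) != len(s2):
--         return False
--
--     if K < 0:
--         return False
--
--     if K >= len(s1):
--         return True
--
--     freq_map = defaultdict(int)
--     for ch in s1:
--         freq_map[ch] += 1
--
--     for ch in s2:
--         freq_map[ch] -= 1
--
--     difference = 0
--     for count in freq_map.values():
--         if count > 0:
--             difference += count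
--
--     return difference <= K
-- ===== SOURCE B (Python) =====
-- def kth_anagram(s1: str, s2: str, K: int) -> bool:
--     if s1 is None or s2 is None:
--         return False
--     if len(s1) != len(s2):
--         return False
--     if K < 0:
--         return False
--     if K >= len(s1):
--         return True
--     a = sorted(s1)
--     b = sorted(s2)
--     i = j = common = 0
--     while i < len(a) and j < len(b):
--         if a[i] == b[j]:
--             common += 1
--             i += 1
--             j += 1
--         elif a[i] < b[j]:
--             i += 1
--         else:
--             j += 1
--     return len(s1) - common <= K
-- ===== Notes on version B (the rewrite author's own statement) =====
-- stated objective: alternative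
-- what changed: Replaces the defaultdict frequency map and positive-difference sum with sorting both strings and a two-pointer merge that counts the multiset-intersection size, returning len(s1) - common <= K.
import Mathlib
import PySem

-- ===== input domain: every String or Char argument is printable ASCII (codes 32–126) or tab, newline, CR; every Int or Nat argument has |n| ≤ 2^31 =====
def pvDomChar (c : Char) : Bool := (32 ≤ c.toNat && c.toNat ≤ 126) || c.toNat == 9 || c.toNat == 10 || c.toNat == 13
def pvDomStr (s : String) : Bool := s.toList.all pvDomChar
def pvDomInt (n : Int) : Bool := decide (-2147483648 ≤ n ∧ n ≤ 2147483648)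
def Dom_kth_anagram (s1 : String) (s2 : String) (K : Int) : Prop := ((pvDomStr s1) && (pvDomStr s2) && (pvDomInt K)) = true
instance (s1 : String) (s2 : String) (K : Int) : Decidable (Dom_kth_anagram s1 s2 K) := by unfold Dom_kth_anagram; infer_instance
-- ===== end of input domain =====

-- B replaces A's frequency map with sort + two-pointer merge counting the multiset intersection (alternative algorithm, not claimed faster).

-- ===== PORT A =====
def kth_anagram (s1 : String) (s2 : String) (K : Int) : Bool :=
  -- 's1 is None / s2 is None' cannot occur for Lean Strings
  if s1.toList.length ≠ s2.toList.length then false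
  else if K < 0 then false
  else if (s1.toList.length : Int) ≤ K then true
  else
    let d1 := s1.toList.foldl (fun d ch => d.modify ch 0 (· + 1)) (PySem.Dict.empty : PySem.Dict Char Int)
    let d2 := s2.toList.foldl (fun d ch => d.modify ch 0 (· - 1)) d1
    let difference := d2.values.foldl (fun acc c => if 0 < c then acc + c else acc) (0 : Int)
    decide (difference ≤ K)

-- ===== PORT B =====
def mergeCommon : List Char → List Char → Nat
  | [], _ => 0
  | _ :: _, [] => 0
  | x :: xs, y :: ys =>
    if x = y then 1 + mergeCommon xs ys
    else if x < y then mergeCommon xs (y :: ys)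
    else mergeCommon (x :: xs) ys
termination_by a b => a.length + b.length

def kth_anagram_alt (s1 : String) (s2 : String) (K : Int) : Bool :=
  if s1.toList.length ≠ s2.toList.length then false
  else if K < 0 then false
  else if (s1.toList.length : Int) ≤ K then true
  else
    let a := PySem.List.sorted s1.toList (fun c => c) false
    let b := PySem.List.sorted s2.toList (fun c => c) false
    let common := mergeCommon a b
    decide ((s1.toList.length : Int) - (common : Int) ≤ K)

-- ===== PRECONDITION & SPEC =====
def Spec_kth_anagram (s1 : String) (s2 : String) (K : Int) (out : Bool) : Prop := out = kth_anagram_alt s1 s2 K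
instance (s1 : String) (s2 : String) (K : Int) (out : Bool) : Decidable (Spec_kth_anagram s1 s2 K out) := by unfold Spec_kth_anagram; infer_instance

-- ===== CLAIM (what is proved, stated in full; the proofs are below) =====
def Claim_equal_kth_anagram : Prop := ∀ (s1 : String) (s2 : String) (K : Int), Dom_kth_anagram s1 s2 K → Spec_kth_anagram s1 s2 K (kth_anagram s1 s2 K)

-- ===== LEMMAS AND PROOFS =====

-- the two-pointer merge on sorted lists computes the multiset-intersection size
theorem mergeCommon_eq_inter_card : ∀ (a b : List Char),
    a.Pairwise (· ≤ ·) → b.Pairwise (· ≤ ·) →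
    mergeCommon a b = ((↑a : Multiset Char) ∩ ↑b).card
  | [], b, _, _ => by simp [mergeCommon]
  | _ :: _, [], _, _ => by simp [mergeCommon]
  | x :: xs, y :: ys, ha, hb => by
    have hxs := ha.of_cons
    have hys := hb.of_cons
    by_cases hxy : x = y
    · subst hxy
      have hmem : x ∈ (↑(x :: ys) : Multiset Char) := by simp
      rw [mergeCommon, if_pos rfl,
        mergeCommon_eq_inter_card xs ys hxs hys]
      have hint : ((↑(x :: xs) : Multiset Char) ∩ ↑(x :: ys)) = x ::ₘ ((↑xs : Multiset Char) ∩ ↑ys) := by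
        rw [show ((x :: xs : List Char) : Multiset Char) = x ::ₘ ↑xs by simp,
          Multiset.cons_inter_of_pos _ hmem]
        congr 1
        simp
      rw [hint, Multiset.card_cons]
      omega
    · by_cases hlt : x < y
      · have hnot : x ∉ (↑(y :: ys) : Multiset Char) := by
          simp only [Multiset.mem_coe, List.mem_cons]
          rintro (rfl | hx)
          · exact hxy rfl
          · exact absurd (List.rel_of_pairwise_cons hb hx) (not_le.mpr hlt)
        rw [mergeCommon, if_neg hxy, if_pos hlt,
          mergeCommon_eq_inter_card xs (y :: ys) hxs hb,
          show ((x :: xs : List Char) : Multiset Char) = x ::ₘ ↑xs by simp,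
          Multiset.cons_inter_of_neg _ hnot]
      · have hyx : y < x := lt_of_le_of_ne (not_lt.mp hlt) (fun h => hxy h.symm)
        have hnot : y ∉ (↑(x :: xs) : Multiset Char) := by
          simp only [Multiset.mem_coe, List.mem_cons]
          rintro (rfl | hy)
          · exact lt_irrefl _ hyx
          · exact absurd (List.rel_of_pairwise_cons ha hy) (not_le.mpr hyx)
        have hint : (↑(x :: xs) : Multiset Char) ∩ ↑(y :: ys) = (↑(x :: xs) : Multiset Char) ∩ ↑ys := by
          rw [Multiset.inter_comm,
            show ((y :: ys : List Char) : Multiset Char) = y ::ₘ ↑ys by simp,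
            Multiset.cons_inter_of_neg _ hnot, Multiset.inter_comm]
        rw [mergeCommon, if_neg hxy, if_neg hlt,
          mergeCommon_eq_inter_card (x :: xs) ys ha hys, hint]
termination_by a b => a.length + b.length

theorem sum_map_add_int (ks : List Char) (f g : Char → Int) :
    (ks.map (fun x => f x + g x)).sum = (ks.map f).sum + (ks.map g).sum := by
  induction ks with
  | nil => simp
  | cons k ks ih => simp [ih]; ring

theorem sum_map_sub_int (ks : List Char) (f g : Char → Int) :
    (ks.map (fun x => f x - g x)).sum = (ks.map f).sum - (ks.map g).sum := by
  induction ks with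
  | nil => simp
  | cons k ks ih => simp [ih]; ring

theorem sum_ind_zero (ks : List Char) (a : Char) (ha : a ∉ ks) :
    (ks.map (fun k => if k = a then (1:Int) else 0)).sum = 0 := by
  induction ks with
  | nil => simp
  | cons k ks ih =>
    simp only [List.mem_cons, not_or] at ha
    simp [if_neg (fun h : k = a => ha.1 h.symm), ih ha.2]

theorem sum_ind_one (ks : List Char) (a : Char) (hnd : ks.Nodup) (ha : a ∈ ks) :
    (ks.map (fun k => if k = a then (1:Int) else 0)).sum = 1 := by
  induction ks with
  | nil => simp at ha
  | cons k ks ih =>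
    rcases List.mem_cons.mp ha with rfl | hmem
    · simp [sum_ind_zero ks a (List.nodup_cons.mp hnd).1]
    · have hne : k ≠ a := fun h => (List.nodup_cons.mp hnd).1 (h ▸ hmem)
      simp [if_neg hne, ih (List.nodup_cons.mp hnd).2 hmem]

-- sum of counts over a nodup list containing every element of m equals m.card
theorem sum_count_eq_card (m : Multiset Char) (ks : List Char)
    (hnd : ks.Nodup) (hsub : ∀ x ∈ m, x ∈ ks) :
    (ks.map (fun k => (m.count k : Int))).sum = (m.card : Int) := by
  induction m using Multiset.induction_on with
  | empty => simp
  | cons a m ih =>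
    have ha : a ∈ ks := hsub a (Multiset.mem_cons_self a m)
    have h1 : (ks.map (fun k => ((a ::ₘ m).count k : Int))).sum
        = (ks.map (fun k => (m.count k : Int) + (if k = a then (1:Int) else 0))).sum := by
      congr 1
      apply List.map_congr_left
      intro k _
      rw [Multiset.count_cons]
      split_ifs <;> push_cast <;> ring
    rw [h1, sum_map_add_int, ih (fun x hx => hsub x (Multiset.mem_cons_of_mem hx)),
      sum_ind_one ks a hnd ha, Multiset.card_cons]
    push_cast
    ring

-- the positive-difference accumulation loop as a sum of positive parts
theorem foldl_pos_sum (vs : List Int) (acc : Int) :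
    vs.foldl (fun acc c => if 0 < c then acc + c else acc) acc
      = acc + (vs.map (fun c => max c 0)).sum := by
  induction vs generalizing acc with
  | nil => simp
  | cons v vs ih =>
    simp only [List.foldl_cons, List.map_cons, List.sum_cons, ih]
    split_ifs with h
    · omega
    · omega

-- the second frequency loop subtracts counts
theorem getD_foldl_modify_sub_one (l : List Char) (d : PySem.Dict Char Int) (v : Char) :
    (l.foldl (fun d x => d.modify x 0 (· - 1)) d).getD v 0 = d.getD v 0 - l.count v := by
  induction l generalizing d with
  | nil => simp
  | cons x l ih =>
    simp only [List.foldl_cons, ih, PySem.Dict.getD_modify, List.count_cons]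
    by_cases h : v = x
    · subst h
      simp
      omega
    · rw [if_neg h]
      have hbeq : (x == v) = false := by simp [Ne.symm h]
      simp [hbeq]

-- the core identity: A's positive-difference sum equals len(l1) minus the merge count
theorem kth_core (l1 l2 : List Char) (K : Int) :
    decide (((l2.foldl (fun d ch => d.modify ch 0 (· - 1))
          (l1.foldl (fun d ch => d.modify ch 0 (· + 1)) (PySem.Dict.empty : PySem.Dict Char Int))).values.foldl
          (fun acc c => if 0 < c then acc + c else acc) (0 : Int)) ≤ K)
      = decide ((l1.length : Int)
          - (mergeCommon (PySem.List.sorted l1 (fun c => c) false)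
              (PySem.List.sorted l2 (fun c => c) false) : Int) ≤ K) := by
  set d1 := l1.foldl (fun d ch => d.modify ch 0 (· + 1)) (PySem.Dict.empty : PySem.Dict Char Int) with hd1
  set d2 := l2.foldl (fun d ch => d.modify ch 0 (· - 1)) d1 with hd2
  have hd1c : d1 = PySem.Dict.counter l1 := by
    rw [hd1, PySem.Dict.counter_eq_foldl]
  have hget : ∀ c, d2.getD c 0 = (l1.count c : Int) - (l2.count c : Int) := by
    intro c
    rw [hd2, getD_foldl_modify_sub_one, hd1c, PySem.Dict.getD_counter]
  have hnd1 : d1.keys.Nodup := by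
    rw [hd1c]; exact PySem.Dict.nodup_keys_counter l1
  have hnd : d2.keys.Nodup := by
    rw [hd2]
    exact PySem.Dict.nodup_keys_foldl_modify_key l2 (fun x => x) 0 (fun _ _ => (· - 1)) d1 hnd1
  have hkeys : ∀ x, (x ∈ l1 ∨ x ∈ l2) → x ∈ d2.keys := by
    intro x hx
    rw [hd2, PySem.Dict.keys_foldl_modify l2 0 (fun _ _ => (· - 1)) d1, PySem.Set.mem_update]
    rcases hx with h | h
    · left
      rw [hd1c, PySem.Dict.keys_counter, PySem.Set.mem_ofList]
      exact h
    · right; exact h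
  have hvals : d2.values = d2.keys.map (fun k => d2.getD k 0) :=
    PySem.Dict.values_eq_map_keys d2 hnd 0
  have hdiff : d2.values.foldl (fun acc c => if 0 < c then acc + c else acc) (0:Int)
      = (d2.keys.map (fun k => max ((l1.count k : Int) - (l2.count k : Int)) 0)).sum := by
    rw [hvals, foldl_pos_sum, zero_add, List.map_map]
    congr 1
    apply List.map_congr_left
    intro k _
    simp [hget k]
  have hsplit : (d2.keys.map (fun k => max ((l1.count k : Int) - (l2.count k : Int)) 0)).sum
      = (d2.keys.map (fun k => (l1.count k : Int))).sum
        - (d2.keys.map (fun k => min ((l1.count k : Int)) ((l2.count k : Int)))).sum := by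
    rw [← sum_map_sub_int]
    congr 1
    apply List.map_congr_left
    intro k _
    omega
  have hsum1 : (d2.keys.map (fun k => (l1.count k : Int))).sum = (l1.length : Int) := by
    have := sum_count_eq_card (↑l1) d2.keys hnd
      (fun x hx => hkeys x (Or.inl (Multiset.mem_coe.mp hx)))
    simpa using this
  have hsum2 : (d2.keys.map (fun k => min ((l1.count k : Int)) ((l2.count k : Int)))).sum
      = (((↑l1 : Multiset Char) ∩ ↑l2).card : Int) := by
    have := sum_count_eq_card ((↑l1 : Multiset Char) ∩ ↑l2) d2.keys hnd
      (fun x hx => hkeys x (Or.inl (Multiset.mem_coe.mp (Multiset.mem_of_le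
        Multiset.inter_le_left hx))))
    rw [← this]
    congr 1
    apply List.map_congr_left
    intro k _
    rw [Multiset.count_inter]
    push_cast
    simp
  have hcommon : (mergeCommon (PySem.List.sorted l1 (fun c => c) false)
      (PySem.List.sorted l2 (fun c => c) false) : Int)
      = (((↑l1 : Multiset Char) ∩ ↑l2).card : Int) := by
    have e1 : ((PySem.List.sorted l1 (fun c => c) false : List Char) : Multiset Char) = ↑l1 :=
      Quot.sound (PySem.List.sorted_perm l1 (fun c => c) false)
    have e2 : ((PySem.List.sorted l2 (fun c => c) false : List Char) : Multiset Char) = ↑l2 :=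
      Quot.sound (PySem.List.sorted_perm l2 (fun c => c) false)
    rw [mergeCommon_eq_inter_card _ _
      (PySem.List.sorted_pairwise l1 (fun c => c))
      (PySem.List.sorted_pairwise l2 (fun c => c)), e1, e2]
  rw [hdiff, hsplit, hsum1, hsum2, hcommon]

-- ===== VERDICT (by name: the statement is the Claim_ definition above) =====
theorem kth_anagram_spec : Claim_equal_kth_anagram := by
  intro s1 s2 K _
  unfold Spec_kth_anagram kth_anagram kth_anagram_alt
  split_ifs with h1 h2 h3
  · rfl
  · rfl
  · rfl
  · exact kth_core s1.toList s2.toList K
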